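-- pv_equiv track=rewrite | github.com/pabloroldan98/team-analysis-ai-code | streamlit_app.py | _total_combinations
-- ===== SOURCE A (Python) =====
-- from typing import Dict, List, Optional, Tuple
--
-- def _total_combinations(total: int, max_per_pos: int = 3) -> List[List[int]]:
--     """Return all 4-element arrays [GK, DEF, MID, ATT] that sum to *total*
--     with each element in [0, max_per_pos]."""
--     combos = []
--     for gk in range(min(total, max_per_pos) + 1):
--         for df in range(min(total - gk, max_per_pos) + 1):
--             for mid in range(min(total - gk - df, max_per_pos) + 1):
--                 att = total - gk - df - mid
--                 if 0 <= att <= max_per_pos: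
--                     combos.append([gk, df, mid, att])
--     return combos
-- ===== SOURCE B (Python) =====
-- from typing import Dict, List, Optional, Tuple
--
-- def _total_combinations(total: int, max_per_pos: int = 3) -> List[List[int]]:
--     """Return all 4-element arrays [GK, DEF, MID, ATT] that sum to *total*
--     with each element in [0, max_per_pos]."""
--     def rec(positions_left: int, remaining: int) -> List[List[int]]:
--         if positions_left == 1:
--             return [[remaining]] if 0 <= remaining <= max_per_pos else []
--         out = []
--         for v in range(min(remaining, max_per_pos) + 1):
--             for tail in rec(positions_left - 1, remaining - v):
--                 out.append([v] + tail)
--         return out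
--     return rec(4, total)
-- ===== Notes on version B (the rewrite author's own statement) =====
-- stated objective: alternative
-- what changed: Replaced the three hard-coded nested bounded loops with a single recursive helper rec(positions_left, remaining) that prepends each feasible value to the tuples of the remaining positions, generalising the enumeration to any number of positions.
import Mathlib
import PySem

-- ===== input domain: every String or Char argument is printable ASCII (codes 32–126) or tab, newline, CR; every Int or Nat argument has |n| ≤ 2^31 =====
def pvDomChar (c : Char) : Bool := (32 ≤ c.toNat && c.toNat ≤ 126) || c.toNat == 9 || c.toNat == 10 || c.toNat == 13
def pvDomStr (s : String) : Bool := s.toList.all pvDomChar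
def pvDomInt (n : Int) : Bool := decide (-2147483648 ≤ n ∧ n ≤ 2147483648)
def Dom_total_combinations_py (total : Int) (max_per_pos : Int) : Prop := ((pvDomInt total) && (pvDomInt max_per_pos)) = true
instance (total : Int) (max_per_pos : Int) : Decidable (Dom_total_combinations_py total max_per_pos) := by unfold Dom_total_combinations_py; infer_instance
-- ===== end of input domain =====

-- B replaces A's three hard-coded nested loops with one recursive helper over (positions_left, remaining) — an alternative decomposition of the same enumeration, same cost.


-- ===== PORT A =====
-- Port of A: three nested bounded loops, transliterated as foldl over pyRange.
def total_combinations_py (total : Int) (max_per_pos : Int) : List (List Int) :=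
  (PySem.List.pyRange 0 (min total max_per_pos + 1) 1).foldl (fun combos gk =>
    (PySem.List.pyRange 0 (min (total - gk) max_per_pos + 1) 1).foldl (fun combos df =>
      (PySem.List.pyRange 0 (min (total - gk - df) max_per_pos + 1) 1).foldl (fun combos mid =>
        let att := total - gk - df - mid
        if 0 ≤ att ∧ att ≤ max_per_pos then combos ++ [[gk, df, mid, att]] else combos)
        combos)
      combos)
    []

-- ===== PORT B =====
-- Port of B: recursive helper rec(positions_left, remaining); the 0 case is unreachable
-- from the entry point and only makes the recursion total.
def tcRec (max_per_pos : Int) : Nat → Int → List (List Int)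
  | 0, _ => []
  | 1, remaining => if 0 ≤ remaining ∧ remaining ≤ max_per_pos then [[remaining]] else []
  | n + 2, remaining =>
    (PySem.List.pyRange 0 (min remaining max_per_pos + 1) 1).foldl
      (fun out v =>
        (tcRec max_per_pos (n + 1) (remaining - v)).foldl
          (fun out tail => out ++ [v :: tail]) out)
      []

def total_combinations_py_alt (total : Int) (max_per_pos : Int) : List (List Int) :=
  tcRec max_per_pos 4 total

-- ===== PRECONDITION & SPEC =====
def Spec_total_combinations_py (total : Int) (max_per_pos : Int) (out : List (List Int)) : Prop := out = total_combinations_py_alt total max_per_pos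
instance (total : Int) (max_per_pos : Int) (out : List (List Int)) : Decidable (Spec_total_combinations_py total max_per_pos out) := by unfold Spec_total_combinations_py; infer_instance

-- ===== CLAIM (what is proved, stated in full; the proofs are below) =====
def Claim_equal_total_combinations_py : Prop := ∀ (total : Int) (max_per_pos : Int), Dom_total_combinations_py total max_per_pos → Spec_total_combinations_py total max_per_pos (total_combinations_py total max_per_pos)

-- ===== LEMMAS AND PROOFS =====

-- ===== VERDICT (by name: the statement is the Claim_ definition above) =====
-- one unfolding step of the recursion, in flatMap/map form
theorem tcRec_succ (m : Int) (n : Nat) (r : Int) :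
    tcRec m (n + 2) r =
      (PySem.List.pyRange 0 (min r m + 1) 1).flatMap
        (fun v => (tcRec m (n + 1) (r - v)).map (fun tail => v :: tail)) := by
  simp only [tcRec, PySem.List.foldl_append_singleton_eq_map,
    PySem.List.foldl_append_eq_flatMap, List.nil_append]

theorem tcRec_two (m r : Int) :
    tcRec m 2 r =
      ((PySem.List.pyRange 0 (min r m + 1) 1).filter
          (fun mid => decide (0 ≤ r - mid ∧ r - mid ≤ m))).map
        (fun mid => [mid, r - mid]) := by
  have h1 : tcRec m 2 r = (PySem.List.pyRange 0 (min r m + 1) 1).foldl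
      (fun acc mid => if 0 ≤ r - mid ∧ r - mid ≤ m then acc ++ [[mid, r - mid]] else acc) [] := by
    show (PySem.List.pyRange 0 (min r m + 1) 1).foldl _ [] = _
    refine PySem.List.foldl_congr_mem _ _ _ _ (fun acc v hv => ?_)
    show (tcRec m 1 (r - v)).foldl (fun out tail => out ++ [v :: tail]) acc = _
    show (if 0 ≤ r - v ∧ r - v ≤ m then [[r - v]] else []).foldl _ acc = _
    by_cases h : 0 ≤ r - v ∧ r - v ≤ m
    · rw [if_pos h, if_pos h]; rfl
    · rw [if_neg h, if_neg h]; rfl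
  rw [h1, PySem.List.foldl_append_ite]
  exact List.nil_append _

theorem tcRec_three (m r : Int) :
    tcRec m 3 r =
      (PySem.List.pyRange 0 (min r m + 1) 1).flatMap
        (fun v => (tcRec m 2 (r - v)).map (fun tail => v :: tail)) :=
  tcRec_succ m 1 r

theorem tcRec_four (m r : Int) :
    tcRec m 4 r =
      (PySem.List.pyRange 0 (min r m + 1) 1).flatMap
        (fun v => (tcRec m 3 (r - v)).map (fun tail => v :: tail)) :=
  tcRec_succ m 2 r

-- ===== VERDICT (by name: the statement is the Claim_ definition above) =====
theorem total_combinations_py_spec : Claim_equal_total_combinations_py := by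
  intro total m _
  show total_combinations_py total m = total_combinations_py_alt total m
  unfold total_combinations_py total_combinations_py_alt
  simp only [tcRec_four, tcRec_three, tcRec_two, List.map_flatMap, List.map_map,
    PySem.List.foldl_append_eq_flatMap, PySem.List.foldl_append_ite, List.nil_append]
  rfl
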